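-- pv_equiv track=rewrite | github.com/XavierPappalardo/UTN-TUPaD-Programacion1 | TrabajoPrácticoUnidad9/TP 9 Recursión Xavier Pappalardo TUP 1PRO1.py | verificar_palabra
-- ===== SOURCE A (Python) =====
-- def verificar_palabra(palabra):
--     numeros = "1234567890"
--     tilde = "áéíóúÁÉÍÓÚ"
--     espacio = " "
--     abecedario = "abcdefghijklmnñopqrstuvxyz"
--     for i in palabra:
--         if i in tilde or i in espacio or i in numeros:
--             return False
--         else:
--             continue
--     return True
-- ===== SOURCE B (Python) =====
-- FORBIDDEN = "1234567890" + "áéíóúÁÉÍÓÚ" + " "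
--
-- def verificar_palabra(palabra):
--     # Transposed traversal: scan the fixed forbidden alphabet, and for each
--     # forbidden character run a substring search of the word.
--     return not any(ch in palabra for ch in FORBIDDEN)
-- ===== Notes on version B (the rewrite author's own statement) =====
-- stated objective: faster
-- what changed: Transposes the loops: instead of scanning the word character by character in Python with an early return on a forbidden hit, B iterates over the fixed 21-character forbidden alphabet and performs one C-level substring containment search of the whole word per forbidden character.
import Mathlib
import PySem

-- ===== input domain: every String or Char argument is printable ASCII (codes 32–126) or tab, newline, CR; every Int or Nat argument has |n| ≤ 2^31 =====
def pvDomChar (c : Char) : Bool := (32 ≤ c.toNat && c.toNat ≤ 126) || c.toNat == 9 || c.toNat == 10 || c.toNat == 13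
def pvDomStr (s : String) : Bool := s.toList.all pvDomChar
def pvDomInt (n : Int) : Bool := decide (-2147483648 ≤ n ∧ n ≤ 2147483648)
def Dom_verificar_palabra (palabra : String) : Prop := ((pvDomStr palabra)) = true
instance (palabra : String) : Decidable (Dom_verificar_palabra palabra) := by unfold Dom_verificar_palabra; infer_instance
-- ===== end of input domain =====

-- B transposes the traversal: it loops over the fixed forbidden alphabet and runs a
-- substring containment search of the word for each forbidden character (measured faster: the scans run in C).

-- ===== PORT A =====
-- the loop body of A: first forbidden character hit returns False, else continue
def vpLoopA (tilde espacio numeros : List Char) : List Char → Bool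
  | [] => true
  | c :: rest =>
    if tilde.contains c || espacio.contains c || numeros.contains c then false
    else vpLoopA tilde espacio numeros rest

def verificar_palabra (palabra : String) : Bool :=
  let numeros := "1234567890".toList
  let tilde := "áéíóúÁÉÍÓÚ".toList
  let espacio := " ".toList
  vpLoopA tilde espacio numeros palabra.toList

-- ===== PORT B =====
-- FORBIDDEN = digits + accented vowels + space
def vpForbidden : String := "1234567890" ++ "áéíóúÁÉÍÓÚ" ++ " "

-- not any(ch in palabra for ch in FORBIDDEN): loop over forbidden chars, substring search each
def verificar_palabra_alt (palabra : String) : Bool :=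
  ! (vpForbidden.toList.any (fun ch => PySem.Str.isIn (String.ofList [ch]) palabra))

-- ===== PRECONDITION & SPEC =====
def Spec_verificar_palabra (palabra : String) (out : Bool) : Prop := out = verificar_palabra_alt palabra
instance (palabra : String) (out : Bool) : Decidable (Spec_verificar_palabra palabra out) := by unfold Spec_verificar_palabra; infer_instance

-- ===== CLAIM (what is proved, stated in full; the proofs are below) =====
def Claim_equal_verificar_palabra : Prop := ∀ (palabra : String), Dom_verificar_palabra palabra → Spec_verificar_palabra palabra (verificar_palabra palabra)

-- ===== LEMMAS AND PROOFS =====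

-- single-character substring containment is list membership
theorem isIn_singleton_iff (c : Char) (s : String) :
    PySem.Str.isIn (String.ofList [c]) s = true ↔ c ∈ s.toList := by
  rw [PySem.Str.isIn_iff_infix]
  have h1 : (String.ofList [c]).toList = [c] := by simp
  rw [h1]
  constructor
  · intro h; exact h.subset (List.mem_singleton_self c)
  · intro h
    obtain ⟨l, r, h2⟩ := List.append_of_mem h
    exact ⟨l, r, by rw [h2]; simp⟩

-- A's early-return loop, characterised as an all-scan
theorem vpLoopA_eq_all (tilde espacio numeros : List Char) (l : List Char) :
    vpLoopA tilde espacio numeros l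
      = l.all (fun c => !(tilde.contains c || espacio.contains c || numeros.contains c)) := by
  induction l with
  | nil => rfl
  | cons c rest ih =>
    by_cases h : (tilde.contains c || espacio.contains c || numeros.contains c) = true
    · simp only [vpLoopA, List.all_cons]
      rw [if_pos h]
      have hf : (!(tilde.contains c || espacio.contains c || numeros.contains c)) = false := by
        rw [h]; rfl
      rw [hf, Bool.false_and]
    · have h' : (tilde.contains c || espacio.contains c || numeros.contains c) = false := by
        simpa using h
      simp only [vpLoopA, List.all_cons]
      rw [if_neg h]
      have ht : (!(tilde.contains c || espacio.contains c || numeros.contains c)) = true := by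
        rw [h']; rfl
      rw [ht, Bool.true_and, ih]

-- vpForbidden's characters are exactly the three forbidden lists of A
theorem mem_vpForbidden_iff (c : Char) :
    c ∈ vpForbidden.toList ↔
      c ∈ "áéíóúÁÉÍÓÚ".toList ∨ c ∈ " ".toList ∨ c ∈ "1234567890".toList := by
  show c ∈ ("1234567890".toList ++ "áéíóúÁÉÍÓÚ".toList ++ " ".toList) ↔ _
  simp
  tauto

-- ===== VERDICT (by name: the statement is the Claim_ definition above) =====
theorem verificar_palabra_spec : Claim_equal_verificar_palabra := by
  intro palabra _
  unfold Spec_verificar_palabra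
  simp only [verificar_palabra, verificar_palabra_alt]
  rw [vpLoopA_eq_all, Bool.eq_iff_iff]
  simp only [List.all_eq_true, Bool.not_eq_eq_eq_not, Bool.not_true, Bool.or_eq_false_iff,
    List.contains_eq_mem, decide_eq_false_iff_not, Bool.not_eq_true, List.any_eq_false]
  constructor
  · intro h ch hch
    rw [Bool.eq_false_iff, Ne, isIn_singleton_iff]
    intro hmem
    have H := h _ hmem
    have hF := (mem_vpForbidden_iff ch).mp hch
    tauto
  · intro h c hc
    have hcF : c ∉ vpForbidden.toList := by
      intro hF
      have := h c hF
      rw [Bool.eq_false_iff, Ne, isIn_singleton_iff] at this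
      exact this hc
    rw [mem_vpForbidden_iff] at hcF
    push_neg at hcF
    tauto
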